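-- pv_equiv track=rewrite | github.com/yml29511/command-center | .agents/skills/auto-dev-team/scripts/blast-radius.py | expand_reverse_chain
-- ===== SOURCE A (Python) =====
-- from collections import defaultdict
-- from typing import Dict, Iterable, List, Optional, Sequence, Set, Tuple
--
-- def expand_reverse_chain(
--     seeds: Iterable[str],
--     reverse_graph: Dict[str, Set[str]],
--     depth: int,
-- ) -> Dict[int, List[str]]:
--     results: Dict[int, List[str]] = defaultdict(list)
--     frontier = list(seeds)
--     seen: Set[str] = set(frontier)
--     for level in range(1, max(depth, 0) + 1):
--         next_frontier: List[str] = []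
--         for node in frontier:
--             for importer in sorted(reverse_graph.get(node, set())):
--                 if importer in seen:
--                     continue
--                 results[level].append(importer)
--                 next_frontier.append(importer)
--                 seen.add(importer)
--         frontier = next_frontier
--         if not frontier:
--             break
--     return results
-- ===== SOURCE B (Python) =====
-- from collections import defaultdict, deque
--
--
-- def expand_reverse_chain(seeds, reverse_graph, depth):
--     results = defaultdict(list)
--     limit = max(depth, 0)
--     seeds = list(seeds)
--     seen = set(seeds)
--     queue = deque((node, 0) for node in seeds)
--     while queue:
--         node, level = queue.popleft()
--         if level == limit:
--             continue
--         for importer in sorted(reverse_graph.get(node, ())):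
--             if importer not in seen:
--                 seen.add(importer)
--                 results[level + 1].append(importer)
--                 queue.append((importer, level + 1))
--     return results
-- ===== Notes on version B (the rewrite author's own statement) =====
-- stated objective: alternative
-- what changed: A runs a level-synchronous loop that rebuilds a frontier list per level (for level in range: for node in frontier: ...); B does classic worklist BFS with one FIFO deque of (node, level) pairs seeded at level 0, popping nodes one at a time and enqueueing fresh importers at level+1 until the queue drains, with no per-level frontier lists.
import Mathlib
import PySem

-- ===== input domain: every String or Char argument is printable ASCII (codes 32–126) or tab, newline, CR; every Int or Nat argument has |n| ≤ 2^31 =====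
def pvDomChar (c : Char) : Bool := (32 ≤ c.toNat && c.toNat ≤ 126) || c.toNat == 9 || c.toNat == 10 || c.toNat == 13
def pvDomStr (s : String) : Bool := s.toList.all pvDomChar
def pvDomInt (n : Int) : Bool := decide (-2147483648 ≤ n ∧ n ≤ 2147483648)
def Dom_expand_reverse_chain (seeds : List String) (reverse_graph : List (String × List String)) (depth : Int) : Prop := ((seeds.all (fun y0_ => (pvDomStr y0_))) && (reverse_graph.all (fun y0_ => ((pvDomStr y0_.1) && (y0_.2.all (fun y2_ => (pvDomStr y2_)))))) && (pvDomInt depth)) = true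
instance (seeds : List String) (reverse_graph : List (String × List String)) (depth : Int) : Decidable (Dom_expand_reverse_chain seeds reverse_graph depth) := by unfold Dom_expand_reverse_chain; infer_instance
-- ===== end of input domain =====

-- B replaces A's level-synchronous loop (frontier / next_frontier lists per level) by a classic
-- single-FIFO-worklist BFS over (node, level) pairs (objective: alternative decomposition, same cost).


-- ===== PORT A =====
-- A's innermost block: 'if importer in seen: continue' else append to results[level]
-- (defaultdict), to next_frontier and to seen.  State = (results, next_frontier, seen).
def pvAImp (level : Int) (st : PySem.Dict Int (List String) × List String × PySem.Set String)
    (importer : String) : PySem.Dict Int (List String) × List String × PySem.Set String :=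
  if PySem.Set.contains st.2.2 importer then st
  else (st.1.insert level (st.1.getD level [] ++ [importer]),
        st.2.1 ++ [importer],
        PySem.Set.add st.2.2 importer)

-- 'for importer in sorted(reverse_graph.get(node, set())): …'
def pvANode (rg : PySem.Dict String (List String)) (level : Int)
    (st : PySem.Dict Int (List String) × List String × PySem.Set String) (node : String) :
    PySem.Dict Int (List String) × List String × PySem.Set String :=
  (PySem.List.sorted (rg.getD node []) (fun x => x) false).foldl (pvAImp level) st

-- 'for level in range(1, max(depth, 0) + 1): … frontier = next_frontier; if not frontier: break'
-- Python's range is lazy, so the loop is ported as a counter recursion: the Nat argument is the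
-- number of levels the range still yields ((max depth 0).toNat at level 1), nothing else.
def pvALoop (rg : PySem.Dict String (List String)) :
    Nat → Int → List String → PySem.Dict Int (List String) → PySem.Set String →
    PySem.Dict Int (List String)
  | 0, _, _, results, _ => results
  | n + 1, level, frontier, results, seen =>
    let st := frontier.foldl (pvANode rg level) (results, [], seen)
    if st.2.1 = [] then st.1 else pvALoop rg n (level + 1) st.2.1 st.1 st.2.2

def expand_reverse_chain (seeds : List String) (reverse_graph : List (String × List String)) (depth : Int) : List (Int × List String) :=
  (pvALoop (PySem.Dict.mk reverse_graph) (max depth 0).toNat 1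
    seeds PySem.Dict.empty (PySem.Set.ofList seeds)).items

-- ===== PORT B =====
-- B's inner 'for importer in sorted(...): if importer not in seen: seen.add; results[level+1].append;
-- queue.append((importer, level+1))'.  State = (queue behind the popped head, results, seen).
def pvBImp (lvl : Int) (st : List (String × Int) × PySem.Dict Int (List String) × PySem.Set String)
    (imp : String) : List (String × Int) × PySem.Dict Int (List String) × PySem.Set String :=
  if PySem.Set.contains st.2.2 imp then st
  else (st.1 ++ [(imp, lvl + 1)],
        st.2.1.insert (lvl + 1) (st.2.1.getD (lvl + 1) [] ++ [imp]),
        PySem.Set.add st.2.2 imp)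

-- 'while queue: node, level = queue.popleft(); if level == limit: continue; …'.  The Nat fuel
-- only encodes totality: each recursive call is one pop, and the caller supplies strictly more
-- fuel than the number of pops any run makes (pops = enqueues ≤ len(seeds) + total importer-list
-- length, every post-seed enqueue being a fresh addition to seen).
def pvQLoop (rg : PySem.Dict String (List String)) (limit : Int) :
    Nat → List (String × Int) → PySem.Dict Int (List String) → PySem.Set String →
    PySem.Dict Int (List String)
  | 0, _, results, _ => results
  | _ + 1, [], results, _ => results
  | fuel + 1, (node, lvl) :: q, results, seen =>
    if lvl = limit then pvQLoop rg limit fuel q results seen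
    else
      let st := (PySem.List.sorted (rg.getD node []) (fun x => x) false).foldl (pvBImp lvl) (q, results, seen)
      pvQLoop rg limit fuel st.1 st.2.1 st.2.2

def expand_reverse_chain_alt (seeds : List String) (reverse_graph : List (String × List String)) (depth : Int) : List (Int × List String) :=
  (pvQLoop (PySem.Dict.mk reverse_graph) (max depth 0)
    (seeds.length + (reverse_graph.flatMap (fun p => p.2)).length + 1)
    (seeds.map (fun n => (n, 0)))
    PySem.Dict.empty (PySem.Set.ofList seeds)).items

-- ===== PRECONDITION & SPEC =====
def Spec_expand_reverse_chain (seeds : List String) (reverse_graph : List (String × List String)) (depth : Int) (out : List (Int × List String)) : Prop := out = expand_reverse_chain_alt seeds reverse_graph depth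
instance (seeds : List String) (reverse_graph : List (String × List String)) (depth : Int) (out : List (Int × List String)) : Decidable (Spec_expand_reverse_chain seeds reverse_graph depth out) := by unfold Spec_expand_reverse_chain; infer_instance

-- ===== CLAIM (what is proved, stated in full; the proofs are below) =====
def Claim_equal_expand_reverse_chain : Prop := ∀ (seeds : List String) (reverse_graph : List (String × List String)) (depth : Int), Dom_expand_reverse_chain seeds reverse_graph depth → Spec_expand_reverse_chain seeds reverse_graph depth (expand_reverse_chain seeds reverse_graph depth)

-- ===== LEMMAS AND PROOFS =====

-- 'set.add' on contained / fresh elements.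
lemma pvAddMem (s : PySem.Set String) (y : String) (h : PySem.Set.contains s y = true) :
    PySem.Set.add s y = s := by
  simp only [PySem.Set.add]; rw [if_pos h]

lemma pvAddNotMem (s : PySem.Set String) (y : String) (h : ¬ PySem.Set.contains s y = true) :
    PySem.Set.add s y = s ++ [y] := by
  simp only [PySem.Set.add]; rw [if_neg h]

lemma pvContainsAppend (s : PySem.Set String) (y z : String) :
    PySem.Set.contains (s ++ [y]) z = (PySem.Set.contains s z || (z == y)) := by
  simp [PySem.Set.contains, Bool.beq_eq_decide_eq]

-- The layer produced sequentially by A's (and B's) evolving seen-check (proof-side recursion).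
def pvLayer (seen : PySem.Set String) : List String → List String
  | [] => []
  | x :: rest =>
    if PySem.Set.contains seen x then pvLayer seen rest
    else x :: pvLayer (PySem.Set.add seen x) rest

-- 'append the whole layer to results[level]' in one step.
def pvDApp (results : PySem.Dict Int (List String)) (level : Int) (layer : List String) :
    PySem.Dict Int (List String) :=
  if layer = [] then results else results.insert level (results.getD level [] ++ layer)

lemma pvDApp_cons (res : PySem.Dict Int (List String)) (level : Int) (imp : String) (L : List String) :
    pvDApp (res.insert level (res.getD level [] ++ [imp])) level L = pvDApp res level (imp :: L) := by
  by_cases hL : L = []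
  · simp [pvDApp, hL]
  · simp only [pvDApp, hL, if_false, if_neg (List.cons_ne_nil imp L)]
    rw [PySem.Dict.getD_insert_self, PySem.Dict.insert_insert_self]
    simp

lemma pvDApp_append (res : PySem.Dict Int (List String)) (level : Int) (a b : List String) :
    pvDApp (pvDApp res level a) level b = pvDApp res level (a ++ b) := by
  by_cases ha : a = []
  · simp [pvDApp, ha]
  · by_cases hb : b = []
    · simp [pvDApp, hb]
    · have hab : a ++ b ≠ [] := by simp [ha]
      simp only [pvDApp, ha, hb, hab, if_false]
      rw [PySem.Dict.getD_insert_self, PySem.Dict.insert_insert_self]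
      simp

-- A's per-importer fold over one stream of importers, solved in closed form.
lemma pvStream_foldl (t : List String) : ∀ (level : Int) (res : PySem.Dict Int (List String))
    (nf : List String) (seen : PySem.Set String),
    t.foldl (pvAImp level) (res, nf, seen) =
      (pvDApp res level (pvLayer seen t), nf ++ pvLayer seen t,
       PySem.Set.update seen (pvLayer seen t)) := by
  induction t with
  | nil => intro level res nf seen; simp [pvLayer, pvDApp, PySem.Set.update]
  | cons imp t ih =>
    intro level res nf seen
    by_cases h : PySem.Set.contains seen imp
    · simp only [List.foldl_cons, pvAImp, h, if_true, pvLayer]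
      exact ih level res nf seen
    · rw [List.foldl_cons]
      have hstep : pvAImp level (res, nf, seen) imp
          = (res.insert level (res.getD level [] ++ [imp]), nf ++ [imp], PySem.Set.add seen imp) := by
        simp only [pvAImp]; rw [if_neg h]
      rw [hstep, ih level (res.insert level (res.getD level [] ++ [imp])) (nf ++ [imp])
        (PySem.Set.add seen imp)]
      simp only [pvLayer]
      rw [if_neg h, pvDApp_cons]
      simp [PySem.Set.update]

-- Same closed form for B's per-importer fold (the queue tail plays next_frontier's role).
lemma pvBStream_foldl (t : List String) : ∀ (lvl : Int) (q : List (String × Int))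
    (res : PySem.Dict Int (List String)) (seen : PySem.Set String),
    t.foldl (pvBImp lvl) (q, res, seen) =
      (q ++ (pvLayer seen t).map (fun x => (x, lvl + 1)),
       pvDApp res (lvl + 1) (pvLayer seen t),
       PySem.Set.update seen (pvLayer seen t)) := by
  induction t with
  | nil => intro lvl q res seen; simp [pvLayer, pvDApp, PySem.Set.update]
  | cons imp t ih =>
    intro lvl q res seen
    by_cases h : PySem.Set.contains seen imp
    · simp only [List.foldl_cons, pvBImp, h, if_true, pvLayer]
      exact ih lvl q res seen
    · rw [List.foldl_cons]
      have hstep : pvBImp lvl (q, res, seen) imp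
          = (q ++ [(imp, lvl + 1)],
             res.insert (lvl + 1) (res.getD (lvl + 1) [] ++ [imp]),
             PySem.Set.add seen imp) := by
        simp only [pvBImp]; rw [if_neg h]
      rw [hstep, ih lvl (q ++ [(imp, lvl + 1)])
        (res.insert (lvl + 1) (res.getD (lvl + 1) [] ++ [imp])) (PySem.Set.add seen imp)]
      simp only [pvLayer]
      rw [if_neg h, pvDApp_cons]
      simp [PySem.Set.update]

-- Folding over a flatMap = the nested fold (A's two inner loops as one stream).
lemma pvFoldlFlatMap {α β γ : Type} (f : α → List β) (g : γ → β → γ) :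
    ∀ (l : List α) (b : γ), (l.flatMap f).foldl g b = l.foldl (fun b a => (f a).foldl g b) b := by
  intro l
  induction l with
  | nil => intro b; rfl
  | cons x t ih => intro b; simp [List.flatMap_cons, List.foldl_append, ih]

-- One whole level of A, in closed form.
lemma pvLevel_foldl (frontier : List String) (rg : PySem.Dict String (List String)) (level : Int)
    (res : PySem.Dict Int (List String)) (seen : PySem.Set String) :
    frontier.foldl (pvANode rg level) (res, [], seen) =
      (pvDApp res level (pvLayer seen (frontier.flatMap (fun node => PySem.List.sorted (rg.getD node []) (fun x => x) false))),
       pvLayer seen (frontier.flatMap (fun node => PySem.List.sorted (rg.getD node []) (fun x => x) false)),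
       PySem.Set.update seen (pvLayer seen (frontier.flatMap (fun node => PySem.List.sorted (rg.getD node []) (fun x => x) false)))) := by
  have h := pvFoldlFlatMap (fun node => PySem.List.sorted (rg.getD node []) (fun x => x) false)
    (pvAImp level) frontier (res, [], seen)
  have h2 : frontier.foldl (pvANode rg level) (res, [], seen)
      = (frontier.flatMap (fun node => PySem.List.sorted (rg.getD node []) (fun x => x) false)).foldl
          (pvAImp level) (res, [], seen) := by
    rw [h]; rfl
  rw [h2, pvStream_foldl]
  simp

-- Splitting a layer across an append of the stream.
lemma pvLayer_append (s t : List String) : ∀ seen : PySem.Set String,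
    pvLayer seen (s ++ t)
      = pvLayer seen s ++ pvLayer (PySem.Set.update seen (pvLayer seen s)) t := by
  induction s with
  | nil => intro seen; simp [pvLayer, PySem.Set.update]
  | cons x s ih =>
    intro seen
    by_cases h : PySem.Set.contains seen x
    · simp only [List.cons_append, pvLayer, h, if_true]
      exact ih seen
    · simp only [List.cons_append, pvLayer]
      rw [if_neg h, if_neg h, ih (PySem.Set.add seen x), PySem.Set.update_cons]
      simp

-- Elements of a layer: fresh w.r.t. seen and drawn from the stream.
lemma pvLayer_mem (t : List String) : ∀ (seen : PySem.Set String) (x : String),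
    x ∈ pvLayer seen t → x ∈ t ∧ PySem.Set.contains seen x = false := by
  induction t with
  | nil => intro seen x hx; simp [pvLayer] at hx
  | cons y t ih =>
    intro seen x hx
    by_cases h : PySem.Set.contains seen y
    · rw [pvLayer, if_pos h] at hx
      have := ih seen x hx
      exact ⟨List.mem_cons_of_mem y this.1, this.2⟩
    · rw [pvLayer, if_neg h] at hx
      rcases List.mem_cons.mp hx with rfl | hx'
      · exact ⟨List.mem_cons_self, by simpa using h⟩
      · obtain ⟨hmem, hcon⟩ := ih (PySem.Set.add seen y) x hx'
        refine ⟨List.mem_cons_of_mem y hmem, ?_⟩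
        rw [pvAddNotMem seen y h, pvContainsAppend] at hcon
        cases hc : PySem.Set.contains seen x
        · rfl
        · rw [hc] at hcon; simp at hcon

-- A layer has no duplicates.
lemma pvLayer_nodup (t : List String) : ∀ seen : PySem.Set String, (pvLayer seen t).Nodup := by
  induction t with
  | nil => intro seen; simp [pvLayer]
  | cons y t ih =>
    intro seen
    by_cases h : PySem.Set.contains seen y
    · rw [pvLayer, if_pos h]; exact ih seen
    · rw [pvLayer, if_neg h]
      refine List.nodup_cons.mpr ⟨?_, ih (PySem.Set.add seen y)⟩
      intro hy
      have := (pvLayer_mem t (PySem.Set.add seen y) y hy).2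
      rw [pvAddNotMem seen y h, pvContainsAppend] at this
      simp at this

-- Draining pops: every queue entry already at the depth limit is skipped.
lemma pvQDrain (rg : PySem.Dict String (List String)) (limit : Int) :
    ∀ (q : List (String × Int)) (fuel : Nat) (res : PySem.Dict Int (List String))
      (seen : PySem.Set String), (∀ e ∈ q, e.2 = limit) → q.length ≤ fuel →
    pvQLoop rg limit fuel q res seen = res := by
  intro q
  induction q with
  | nil => intro fuel res seen _ _; cases fuel <;> rfl
  | cons e q ih =>
    intro fuel res seen hall hlen
    obtain ⟨node, lvl⟩ := e
    cases fuel with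
    | zero => simp at hlen
    | succ fuel =>
      have hl : lvl = limit := hall (node, lvl) List.mem_cons_self
      rw [pvQLoop, if_pos hl]
      exact ih fuel res seen (fun e he => hall e (List.mem_cons_of_mem _ he)) (by
        simp at hlen; omega)

-- Processing all queue entries of one level below the limit = A's whole-level closed form.
lemma pvQLevel (rg : PySem.Dict String (List String)) (limit lvl : Int) (hlt : lvl < limit) :
    ∀ (rest acc : List String) (fuel : Nat) (res : PySem.Dict Int (List String))
      (seen : PySem.Set String),
    pvQLoop rg limit (rest.length + fuel)
        (rest.map (fun x => (x, lvl)) ++ acc.map (fun x => (x, lvl + 1))) res seen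
      = pvQLoop rg limit fuel
          ((acc ++ pvLayer seen (rest.flatMap (fun node => PySem.List.sorted (rg.getD node []) (fun x => x) false))).map (fun x => (x, lvl + 1)))
          (pvDApp res (lvl + 1) (pvLayer seen (rest.flatMap (fun node => PySem.List.sorted (rg.getD node []) (fun x => x) false))))
          (PySem.Set.update seen (pvLayer seen (rest.flatMap (fun node => PySem.List.sorted (rg.getD node []) (fun x => x) false)))) := by
  intro rest
  induction rest with
  | nil =>
    intro acc fuel res seen
    simp [pvLayer, pvDApp, PySem.Set.update]
  | cons node rest ih =>
    intro acc fuel res seen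
    have hne : lvl ≠ limit := by omega
    rw [show (node :: rest).length + fuel = (rest.length + fuel) + 1 by simp [List.length_cons]; omega]
    rw [show ((node :: rest).map (fun x => (x, lvl)) ++ acc.map (fun x => (x, lvl + 1)))
          = (node, lvl) :: (rest.map (fun x => (x, lvl)) ++ acc.map (fun x => (x, lvl + 1))) by simp]
    rw [pvQLoop, if_neg hne]
    rw [pvBStream_foldl]
    set L1 := pvLayer seen (PySem.List.sorted (rg.getD node []) (fun x => x) false) with hL1
    have hq : (rest.map (fun x => (x, lvl)) ++ acc.map (fun x => (x, lvl + 1))) ++ L1.map (fun x => (x, lvl + 1))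
        = rest.map (fun x => (x, lvl)) ++ (acc ++ L1).map (fun x => (x, lvl + 1)) := by
      simp [List.map_append]
    simp only []
    rw [hq, ih (acc ++ L1) fuel (pvDApp res (lvl + 1) L1) (PySem.Set.update seen L1)]
    have hstream : (node :: rest).flatMap (fun node => PySem.List.sorted (rg.getD node []) (fun x => x) false)
        = PySem.List.sorted (rg.getD node []) (fun x => x) false
          ++ rest.flatMap (fun node => PySem.List.sorted (rg.getD node []) (fun x => x) false) := by
      simp [List.flatMap_cons]
    rw [hstream, pvLayer_append]
    rw [← hL1]
    set L2 := pvLayer (PySem.Set.update seen L1) (rest.flatMap (fun node => PySem.List.sorted (rg.getD node []) (fun x => x) false))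
    rw [pvDApp_append, PySem.Set.update_append, List.append_assoc]

-- Count of graph values not yet seen (the fuel surplus invariant).
def pvUnseen (allI : List String) (seen : PySem.Set String) : Nat :=
  (allI.filter (fun x => !PySem.Set.contains seen x)).length

lemma pvQLoop_nil (rg : PySem.Dict String (List String)) (limit : Int) (fuel : Nat)
    (res : PySem.Dict Int (List String)) (seen : PySem.Set String) :
    pvQLoop rg limit fuel [] res seen = res := by
  cases fuel <;> rfl

lemma pvUnseen_add_le (allI : List String) (seen : PySem.Set String) (x : String) :
    pvUnseen allI (PySem.Set.add seen x) ≤ pvUnseen allI seen := by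
  by_cases h : PySem.Set.contains seen x
  · rw [pvAddMem _ _ h]
  · rw [pvUnseen, pvUnseen, pvAddNotMem _ _ h, ← List.countP_eq_length_filter,
      ← List.countP_eq_length_filter]
    refine List.countP_mono_left ?_
    intro a _ ha
    rw [pvContainsAppend] at ha
    cases hc : PySem.Set.contains seen a
    · rfl
    · rw [hc] at ha; simp at ha

lemma pvUnseen_add_lt (allI : List String) : ∀ (seen : PySem.Set String) (x : String),
    x ∈ allI → PySem.Set.contains seen x = false →
    pvUnseen allI (PySem.Set.add seen x) < pvUnseen allI seen := by
  induction allI with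
  | nil => intro seen x hx _; simp at hx
  | cons a rest ih =>
    intro seen x hx hf
    have hnot : ¬ PySem.Set.contains seen x = true := by rw [hf]; simp
    have hadd : ∀ b : String, PySem.Set.contains (PySem.Set.add seen x) b
        = (PySem.Set.contains seen b || (b == x)) := by
      intro b; rw [pvAddNotMem _ _ hnot, pvContainsAppend]
    by_cases hax : a = x
    · subst hax
      have h1 : PySem.Set.contains (PySem.Set.add seen a) a = true := by
        rw [hadd]; simp
      have h2 := pvUnseen_add_le rest seen a
      simp only [pvUnseen] at h2 ⊢
      simp only [List.filter_cons, h1, hf, Bool.not_true, Bool.not_false, Bool.false_eq_true,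
        if_false, if_true, List.length_cons]
      omega
    · have hax' : (a == x) = false := by simp [hax]
      have hx' : x ∈ rest := by
        rcases List.mem_cons.mp hx with h | h
        · exact absurd h.symm hax
        · exact h
      have h1 : PySem.Set.contains (PySem.Set.add seen x) a = PySem.Set.contains seen a := by
        rw [hadd, hax', Bool.or_false]
      have hlt := ih seen x hx' hf
      simp only [pvUnseen] at hlt ⊢
      simp only [List.filter_cons, h1]
      cases hc : PySem.Set.contains seen a <;>
        simp only [hc, Bool.not_true, Bool.not_false, Bool.false_eq_true,
          if_false, if_true, List.length_cons] <;> omega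

lemma pvUnseen_layer (allI : List String) : ∀ (layer : List String) (seen : PySem.Set String),
    layer.Nodup → (∀ x ∈ layer, x ∈ allI ∧ PySem.Set.contains seen x = false) →
    layer.length + pvUnseen allI (PySem.Set.update seen layer) ≤ pvUnseen allI seen := by
  intro layer
  induction layer with
  | nil => intro seen _ _; simp [PySem.Set.update]
  | cons x L ih =>
    intro seen hnd hall
    obtain ⟨hx, hL⟩ := List.nodup_cons.mp hnd
    have hxa := hall x List.mem_cons_self
    have hnot : ¬ PySem.Set.contains seen x = true := by rw [hxa.2]; simp
    have ihL := ih (PySem.Set.add seen x) hL (by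
      intro y hy
      refine ⟨(hall y (List.mem_cons_of_mem x hy)).1, ?_⟩
      rw [pvAddNotMem _ _ hnot, pvContainsAppend, (hall y (List.mem_cons_of_mem x hy)).2]
      have : (y == x) = false := by
        simp only [beq_eq_false_iff_ne, ne_eq]
        intro hyx; exact hx (hyx ▸ hy)
      simp [this])
    have hlt := pvUnseen_add_lt allI seen x hxa.1 hxa.2
    rw [PySem.Set.update_cons]
    simp only [List.length_cons]
    omega

-- The main bridge: B's FIFO worklist, run level band by level band, is A's level loop.
lemma pvMain (rg : PySem.Dict String (List String)) (allI : List String)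
    (hsub : ∀ (node x : String), x ∈ rg.getD node [] → x ∈ allI) (limit : Int) :
    ∀ (n : Nat) (lvl : Int), lvl + n = limit →
    ∀ (frontier : List String) (res : PySem.Dict Int (List String)) (seen : PySem.Set String)
      (fuel : Nat), frontier.length + pvUnseen allI seen ≤ fuel →
    pvQLoop rg limit fuel (frontier.map (fun x => (x, lvl))) res seen
      = pvALoop rg n (lvl + 1) frontier res seen := by
  intro n
  induction n with
  | zero =>
    intro lvl hl frontier res seen fuel hfuel
    have hlvl : lvl = limit := by omega
    rw [pvALoop]
    refine pvQDrain rg limit _ fuel res seen ?_ ?_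
    · intro e he
      obtain ⟨y, _, rfl⟩ := List.mem_map.mp he
      simpa using hlvl
    · rw [List.length_map]; omega
  | succ n ih =>
    intro lvl hl frontier res seen fuel hfuel
    have hlt : lvl < limit := by omega
    obtain ⟨fuel', rfl⟩ : ∃ f', fuel = frontier.length + f' :=
      ⟨fuel - frontier.length, by omega⟩
    have hQ := pvQLevel rg limit lvl hlt frontier [] fuel' res seen
    simp only [List.map_nil, List.nil_append, List.append_nil] at hQ
    rw [hQ, pvALoop, pvLevel_foldl]
    simp only []
    by_cases hLay : pvLayer seen (frontier.flatMap (fun node => PySem.List.sorted (rg.getD node []) (fun x => x) false)) = []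
    · rw [hLay]
      simp only [List.map_nil, pvQLoop_nil, pvDApp, if_true]
    · rw [if_neg hLay]
      set stream := frontier.flatMap (fun node => PySem.List.sorted (rg.getD node []) (fun x => x) false) with hs
      have hmemA : ∀ x ∈ pvLayer seen stream, x ∈ allI ∧ PySem.Set.contains seen x = false := by
        intro x hxm
        obtain ⟨hst, hfr⟩ := pvLayer_mem stream seen x hxm
        refine ⟨?_, hfr⟩
        obtain ⟨node, _, hxs⟩ := List.mem_flatMap.mp hst
        exact hsub node x ((PySem.List.mem_sorted _ _ _ _).mp hxs)
      have hcnt := pvUnseen_layer allI (pvLayer seen stream) seen (pvLayer_nodup stream seen) hmemA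
      exact ih (lvl + 1) (by omega) (pvLayer seen stream) _ _ fuel' (by omega)

-- Values looked up in the graph dict come from the raw association list's value lists.
lemma pvGetDSub (rg : List (String × List String)) (node x : String)
    (hx : x ∈ (PySem.Dict.mk rg).getD node []) : x ∈ rg.flatMap (fun p => p.2) := by
  induction rg with
  | nil =>
    have : (PySem.Dict.mk ([] : List (String × List String))).getD node [] = [] := rfl
    rw [this] at hx
    simp at hx
  | cons p rest ih =>
    obtain ⟨k, v⟩ := p
    rw [PySem.Dict.getD_eq_get?_getD, PySem.Dict.get?_mk_cons] at hx
    by_cases hk : (k == node) = true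
    · rw [if_pos hk] at hx
      simp only [Option.getD_some] at hx
      exact List.mem_flatMap.mpr ⟨(k, v), List.mem_cons_self, hx⟩
    · rw [if_neg hk, ← PySem.Dict.getD_eq_get?_getD] at hx
      have := ih hx
      rw [List.flatMap_cons]
      exact List.mem_append_right _ this

-- ===== VERDICT (by name: the statement is the Claim_ definition above) =====
theorem expand_reverse_chain_spec : Claim_equal_expand_reverse_chain := by
  intro seeds rg depth _
  unfold Spec_expand_reverse_chain expand_reverse_chain expand_reverse_chain_alt
  congr 1
  have h0 : (0 : Int) + ((max depth 0).toNat : Int) = max depth 0 := by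
    have := Int.toNat_of_nonneg (le_max_right depth 0); omega
  have := pvMain (PySem.Dict.mk rg) (rg.flatMap (fun p => p.2))
    (fun node x hx => pvGetDSub rg node x hx) (max depth 0)
    (max depth 0).toNat 0 h0 seeds PySem.Dict.empty (PySem.Set.ofList seeds)
    (seeds.length + (rg.flatMap (fun p => p.2)).length + 1)
    (by
      have : pvUnseen (rg.flatMap (fun p => p.2)) (PySem.Set.ofList seeds)
          ≤ (rg.flatMap (fun p => p.2)).length := List.length_filter_le _ _
      omega)
  rw [this]
  norm_num
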